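-- pv_equiv track=rewrite | github.com/faria-23/visual-analytics-final-project | services/color_extraction.py | _determine_overall_mood
-- ===== SOURCE A (Python) =====
-- from typing import List, Dict, Optional, Tuple, Union
--
-- def _determine_overall_mood(themes: List[str], cultural_context: str) -> str:
--     """Determine overall mood based on dominant psychology themes"""
--     try:
--         if not themes:
--             return "neutral"
--
--         # Mood mappings
--         mood_mappings = {
--             "energetic": ["Energy", "Enthusiasm", "Attention", "Cheerfulness", "Optimism"],
--             "calming": ["Calmness", "Passivity", "Openness", "Freshness", "Peace"],
--             "grounded": ["Earth", "Stability", "Natural", "Reliability", "Security"],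
--             "elegant": ["Royalty", "Luxury", "Nobility", "Sophistication"],
--             "warm": ["Warmth", "Movement", "Spontaneity", "Comfort"],
--             "peaceful": ["Nature", "Health", "Growth", "Harmony", "Balance"]
--         }
--
--         # Score each mood
--         mood_scores = {}
--         for mood, mood_themes in mood_mappings.items():
--             score = sum(1 for theme in themes if theme in mood_themes)
--             if score > 0:
--                 mood_scores[mood] = score
--
--         if mood_scores:
--             best_mood = max(mood_scores.items(), key=lambda x: x[1])
--             return f"{best_mood[0]} ({best_mood[1]} matching themes)"
--
--         return f"dominated by {themes[0].lower()} themes"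
--
--     except Exception:
--         return "unclassified"
-- ===== SOURCE B (Python) =====
-- from typing import List
--
-- _MOOD_MAPPINGS = [
--     ("energetic", ["Energy", "Enthusiasm", "Attention", "Cheerfulness", "Optimism"]),
--     ("calming", ["Calmness", "Passivity", "Openness", "Freshness", "Peace"]),
--     ("grounded", ["Earth", "Stability", "Natural", "Reliability", "Security"]),
--     ("elegant", ["Royalty", "Luxury", "Nobility", "Sophistication"]),
--     ("warm", ["Warmth", "Movement", "Spontaneity", "Comfort"]),
--     ("peaceful", ["Nature", "Health", "Growth", "Harmony", "Balance"]),
-- ]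
--
-- # inverted index: theme -> mood (built once; the mood lists are disjoint)
-- _THEME_TO_MOOD = {t: mood for mood, themes in _MOOD_MAPPINGS for t in themes}
--
--
-- def _determine_overall_mood(themes: List[str], cultural_context: str) -> str:
--     """Determine overall mood based on dominant psychology themes"""
--     if not themes:
--         return "neutral"
--     # one pass over the input: count hits per mood via the inverted index
--     counts = {}
--     for theme in themes:
--         mood = _THEME_TO_MOOD.get(theme)
--         if mood is not None:
--             counts[mood] = counts.get(mood, 0) + 1
--     # winner scan in declaration order; strict '>' keeps the first maximum,
--     # matching max() over the ordered scores
--     best_mood = None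
--     best_score = 0
--     for mood, _ in _MOOD_MAPPINGS:
--         c = counts.get(mood, 0)
--         if c > best_score:
--             best_mood, best_score = mood, c
--     if best_mood is not None:
--         return f"{best_mood} ({best_score} matching themes)"
--     return f"dominated by {themes[0].lower()} themes"
-- ===== Notes on version B (the rewrite author's own statement) =====
-- stated objective: faster
-- what changed: Replaces A's six per-mood membership passes over themes (scores dict + max()) by a precomputed inverted theme-to-mood index, a single counting pass over themes, and a winner scan in declaration order that reproduces max()'s first-maximal tie-breaking.
import Mathlib
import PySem

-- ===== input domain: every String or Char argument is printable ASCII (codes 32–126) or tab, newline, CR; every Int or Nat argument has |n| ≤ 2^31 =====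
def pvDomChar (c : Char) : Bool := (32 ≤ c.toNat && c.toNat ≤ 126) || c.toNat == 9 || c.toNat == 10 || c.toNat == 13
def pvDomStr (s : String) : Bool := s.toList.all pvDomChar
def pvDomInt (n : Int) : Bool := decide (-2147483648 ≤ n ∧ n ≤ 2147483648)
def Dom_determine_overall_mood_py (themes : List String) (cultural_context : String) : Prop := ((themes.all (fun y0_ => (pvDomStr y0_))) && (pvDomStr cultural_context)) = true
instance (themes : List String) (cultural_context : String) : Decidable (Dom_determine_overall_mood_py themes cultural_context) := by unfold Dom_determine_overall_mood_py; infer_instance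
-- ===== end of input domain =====

-- B replaces A's six per-mood passes over `themes` by one pass through an inverted
-- theme→mood index plus a winner scan in declaration order (objective: faster; measured).

-- ===== PORT A =====
-- the literal mood_mappings dict of A (insertion order), shared data of both ports
def pvMoodMappings : List (String × List String) :=
  [("energetic", ["Energy", "Enthusiasm", "Attention", "Cheerfulness", "Optimism"]),
   ("calming",   ["Calmness", "Passivity", "Openness", "Freshness", "Peace"]),
   ("grounded",  ["Earth", "Stability", "Natural", "Reliability", "Security"]),
   ("elegant",   ["Royalty", "Luxury", "Nobility", "Sophistication"]),
   ("warm",      ["Warmth", "Movement", "Spontaneity", "Comfort"]),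
   ("peaceful",  ["Nature", "Health", "Growth", "Harmony", "Balance"])]

def determine_overall_mood_py (themes : List String) (cultural_context : String) : String :=
  if themes = [] then "neutral"
  else
    -- mood_scores: for each mood, sum(1 for theme in themes if theme in mood_themes); keep if > 0
    let mood_scores : PySem.Dict String Int :=
      pvMoodMappings.foldl (fun d p =>
        let score : Int := themes.foldl (fun s t => if p.2.contains t then s + 1 else s) 0
        if 0 < score then d.insert p.1 score else d) PySem.Dict.empty
    if mood_scores.items ≠ [] then
      match PySem.List.max? mood_scores.items (fun x => x.2) with
      | some best => best.1 ++ " (" ++ PySem.Int.toStr best.2 ++ " matching themes)"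
      | none => "unclassified"   -- unreachable (items ≠ []); Python's except arm
    else
      match PySem.List.pyGet? themes 0 with
      | some t0 => "dominated by " ++ PySem.Str.lower t0 ++ " themes"
      | none => "unclassified"   -- unreachable (themes ≠ []); Python's except arm

-- ===== PORT B =====
-- inverted index: theme -> mood (the dict comprehension over pvMoodMappings)
def pvMoodIndex : PySem.Dict String String :=
  pvMoodMappings.foldl (fun d p => p.2.foldl (fun d' t => d'.insert t p.1) d) PySem.Dict.empty

def determine_overall_mood_py_alt (themes : List String) (cultural_context : String) : String :=
  match themes with
  | [] => "neutral"
  | t0 :: _ =>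
    -- one pass: counts[mood] = counts.get(mood, 0) + 1 on an index hit
    let counts : PySem.Dict String Int :=
      themes.foldl (fun d t =>
        match pvMoodIndex.get? t with
        | some mood => d.insert mood (d.getD mood 0 + 1)
        | none => d) PySem.Dict.empty
    -- winner scan in declaration order; strict '<' keeps the first maximum
    let best : Option String × Int :=
      pvMoodMappings.foldl (fun b p =>
        let c := counts.getD p.1 0
        if b.2 < c then (some p.1, c) else b) (none, 0)
    match best.1 with
    | some m => m ++ " (" ++ PySem.Int.toStr best.2 ++ " matching themes)"
    | none => "dominated by " ++ PySem.Str.lower t0 ++ " themes"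

-- ===== PRECONDITION & SPEC =====
def Spec_determine_overall_mood_py (themes : List String) (cultural_context : String) (out : String) : Prop := out = determine_overall_mood_py_alt themes cultural_context
instance (themes : List String) (cultural_context : String) (out : String) : Decidable (Spec_determine_overall_mood_py themes cultural_context out) := by unfold Spec_determine_overall_mood_py; infer_instance

-- ===== CLAIM (what is proved, stated in full; the proofs are below) =====
def Claim_equal_determine_overall_mood_py : Prop := ∀ (themes : List String) (cultural_context : String), Dom_determine_overall_mood_py themes cultural_context → Spec_determine_overall_mood_py themes cultural_context (determine_overall_mood_py themes cultural_context)

-- ===== LEMMAS AND PROOFS =====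

-- the index as a literal dict, and its 28 keys
lemma pvMoodIndex_eq : pvMoodIndex =
    PySem.Dict.mk [("Energy","energetic"),("Enthusiasm","energetic"),("Attention","energetic"),
      ("Cheerfulness","energetic"),("Optimism","energetic"),
      ("Calmness","calming"),("Passivity","calming"),("Openness","calming"),("Freshness","calming"),("Peace","calming"),
      ("Earth","grounded"),("Stability","grounded"),("Natural","grounded"),("Reliability","grounded"),("Security","grounded"),
      ("Royalty","elegant"),("Luxury","elegant"),("Nobility","elegant"),("Sophistication","elegant"),
      ("Warmth","warm"),("Movement","warm"),("Spontaneity","warm"),("Comfort","warm"),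
      ("Nature","peaceful"),("Health","peaceful"),("Growth","peaceful"),("Harmony","peaceful"),("Balance","peaceful")] := by
  rfl

def pvKeyList : List String :=
  ["Energy","Enthusiasm","Attention","Cheerfulness","Optimism",
   "Calmness","Passivity","Openness","Freshness","Peace",
   "Earth","Stability","Natural","Reliability","Security",
   "Royalty","Luxury","Nobility","Sophistication",
   "Warmth","Movement","Spontaneity","Comfort",
   "Nature","Health","Growth","Harmony","Balance"]

lemma pvIdx_none (t : String) (hmem : t ∉ pvKeyList) : pvMoodIndex.get? t = none := by
  rw [PySem.Dict.get?_eq_none_iff_not_mem_keys]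
  rw [pvMoodIndex_eq]
  intro hk
  exact hmem (by simpa [pvKeyList, PySem.Dict.keys_mk] using hk)

-- the index sends t to mood p.1 exactly when t is in p's theme list (the lists are disjoint)
set_option maxHeartbeats 1000000 in
lemma pvIdx_char (p : String × List String) (hp : p ∈ pvMoodMappings) (t : String) :
    (pvMoodIndex.get? t == some p.1) = p.2.contains t := by
  by_cases hmem : t ∈ pvKeyList
  · fin_cases hp <;> fin_cases hmem <;> rfl
  · rw [pvIdx_none t hmem]
    simp only [pvKeyList, List.mem_cons, not_or] at hmem
    fin_cases hp <;> simp_all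

-- B's counter: each mood's count is the number of themes the index sends to it
lemma pvCounts_getD (l : List String) (d : PySem.Dict String Int) (m : String) :
    (l.foldl (fun d t =>
        match pvMoodIndex.get? t with
        | some mood => d.insert mood (d.getD mood 0 + 1)
        | none => d) d).getD m 0
      = d.getD m 0 + (l.countP (fun t => pvMoodIndex.get? t == some m) : Int) := by
  induction l generalizing d with
  | nil => simp
  | cons t rest ih =>
    rcases h : pvMoodIndex.get? t with _ | mood
    · simp [List.foldl_cons, h, ih]
    · by_cases hm : m = mood
      · subst hm
        simp [List.foldl_cons, h, ih, PySem.Dict.getD_insert_self]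
        omega
      · simp [List.foldl_cons, h, ih, PySem.Dict.getD_insert, hm, Ne.symm hm]

-- A's per-mood score, as a countP
def pvScore (themes : List String) (p : String × List String) : Int :=
  (themes.countP (fun t => p.2.contains t) : Int)

-- on pvMoodMappings, B's count equals A's score
lemma pvCounts_eq_score (themes : List String) (p : String × List String) (hp : p ∈ pvMoodMappings) :
    (themes.foldl (fun d t =>
        match pvMoodIndex.get? t with
        | some mood => d.insert mood (d.getD mood 0 + 1)
        | none => d) (PySem.Dict.empty : PySem.Dict String Int)).getD p.1 0 = pvScore themes p := by
  rw [pvCounts_getD]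
  simp only [PySem.Dict.getD_empty, zero_add, pvScore]
  congr 1
  exact List.countP_congr (fun t _ => by rw [pvIdx_char p hp t])

-- generic selection machinery: B's winner scan vs max? over the positive entries
def pvMStep (o : Option (String × Int)) (q : String × Int) : Option (String × Int) :=
  match o with
  | none => some q
  | some m => if m.2 < q.2 then some q else some m

def pvBStep (b : Option String × Int) (q : String × Int) : Option String × Int :=
  if b.2 < q.2 then (some q.1, q.2) else b

def pvOpt2Pair (o : Option (String × Int)) : Option String × Int :=
  match o with
  | none => (none, 0)
  | some q => (some q.1, q.2)

lemma pvSel_some (L : List (String × Int)) : ∀ (m : String) (c : Int), 0 < c →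
    L.foldl pvBStep (some m, c)
      = pvOpt2Pair ((L.filter (fun q => 0 < q.2)).foldl pvMStep (some (m, c))) := by
  induction L with
  | nil => intro m c _; rfl
  | cons q rest ih =>
    intro m c hc
    by_cases hq : 0 < q.2
    · by_cases hlt : c < q.2
      · simp [pvBStep, pvMStep, hq, hlt, ih q.1 q.2 hq]
      · simp [pvBStep, pvMStep, hq, hlt, ih m c hc]
    · have hlt : ¬ c < q.2 := by omega
      simp [pvBStep, hq, hlt, ih m c hc]

lemma pvSel (L : List (String × Int)) :
    L.foldl pvBStep (none, 0)
      = pvOpt2Pair ((L.filter (fun q => 0 < q.2)).foldl pvMStep none) := by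
  induction L with
  | nil => rfl
  | cons q rest ih =>
    by_cases hq : 0 < q.2
    · simp [pvBStep, pvMStep, hq, pvSel_some rest q.1 q.2 hq]
    · simp [pvBStep, hq, ih]

lemma pvMax?_eq_fold (L : List (String × Int)) :
    PySem.List.max? L (fun x => x.2) = L.foldl pvMStep none := by
  simp only [PySem.List.max?]
  congr 1
  funext o q
  rcases o with _ | m
  · rfl
  · simp only [pvMStep]

lemma pvMStep_fold_ne_none (L : List (String × Int)) (b : String × Int) :
    L.foldl pvMStep (some b) ≠ none := by
  induction L generalizing b with
  | nil => simp
  | cons q rest ih =>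
    simp only [List.foldl_cons, pvMStep]
    split_ifs <;> exact ih _

-- A's mood_scores items are exactly the positive entries of the ordered score list
lemma pvItems_eq (themes : List String) :
    (pvMoodMappings.foldl (fun d p =>
        if 0 < pvScore themes p then d.insert p.1 (pvScore themes p) else d)
        (PySem.Dict.empty : PySem.Dict String Int)).items
      = (pvMoodMappings.map (fun p => (p.1, pvScore themes p))).filter (fun q => 0 < q.2) := by
  rw [PySem.List.foldl_ite_eq_foldl_filter (p := fun p => 0 < pvScore themes p)
    (f := fun (d : PySem.Dict String Int) p => d.insert p.1 (pvScore themes p))]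
  rw [PySem.Dict.items_foldl_insert_fresh
      (l := pvMoodMappings.filter (fun p => decide (0 < pvScore themes p)))
      (k := fun p => p.1) (v := fun p => pvScore themes p)
      (d := PySem.Dict.empty)
      (by intro a _; exact PySem.Dict.contains_empty _)
      (by exact List.Nodup.sublist (List.filter_sublist.map _) (by decide))]
  rw [List.filter_map]
  rfl

-- the common value of both programs on a non-empty input
def pvResult (t0 : String) (rest : List String) : String :=
  match ((pvMoodMappings.map (fun p => (p.1, pvScore (t0 :: rest) p))).filter
      (fun q => 0 < q.2)).foldl pvMStep none with
  | some b => b.1 ++ " (" ++ PySem.Int.toStr b.2 ++ " matching themes)"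
  | none => "dominated by " ++ PySem.Str.lower t0 ++ " themes"

lemma pvA_eval (t0 : String) (rest : List String) (cc : String) :
    determine_overall_mood_py (t0 :: rest) cc = pvResult t0 rest := by
  have hfun : (fun (d : PySem.Dict String Int) (p : String × List String) =>
      if 0 < (t0 :: rest).foldl (fun s t => if p.2.contains t then s + 1 else s) (0 : Int) then
        d.insert p.1 ((t0 :: rest).foldl (fun s t => if p.2.contains t then s + 1 else s) (0 : Int))
      else d)
      = (fun d p => if 0 < pvScore (t0 :: rest) p then d.insert p.1 (pvScore (t0 :: rest) p) else d) := by
    funext d p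
    rw [PySem.List.foldl_if_add_one (p := fun t => p.2.contains t)]
    simp [pvScore]
  unfold determine_overall_mood_py
  rw [if_neg (by simp)]
  show (if (pvMoodMappings.foldl (fun (d : PySem.Dict String Int) p =>
          if 0 < (t0 :: rest).foldl (fun s t => if p.2.contains t then s + 1 else s) (0 : Int) then
            d.insert p.1 ((t0 :: rest).foldl (fun s t => if p.2.contains t then s + 1 else s) (0 : Int))
          else d) PySem.Dict.empty).items ≠ [] then _ else _) = _
  rw [hfun, pvItems_eq, pvMax?_eq_fold]
  cases hFc : (pvMoodMappings.map (fun p => (p.1, pvScore (t0 :: rest) p))).filter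
      (fun q => 0 < q.2) with
  | nil => simp [pvResult, hFc, PySem.List.pyGet?, PySem.List.pyIdx?]
  | cons f fs =>
    have hne : (f :: fs).foldl pvMStep none ≠ none := by
      simpa [pvMStep] using pvMStep_fold_ne_none fs f
    obtain ⟨b, hb⟩ := Option.ne_none_iff_exists'.mp hne
    simp [pvResult, hFc, hb]

lemma pvB_eval (t0 : String) (rest : List String) (cc : String) :
    determine_overall_mood_py_alt (t0 :: rest) cc = pvResult t0 rest := by
  unfold determine_overall_mood_py_alt
  have hb : pvMoodMappings.foldl (fun (b : Option String × Int) p =>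
      if b.2 < ((t0 :: rest).foldl (fun d t =>
          match pvMoodIndex.get? t with
          | some mood => d.insert mood (d.getD mood 0 + 1)
          | none => d) (PySem.Dict.empty : PySem.Dict String Int)).getD p.1 0 then
        (some p.1, ((t0 :: rest).foldl (fun d t =>
          match pvMoodIndex.get? t with
          | some mood => d.insert mood (d.getD mood 0 + 1)
          | none => d) (PySem.Dict.empty : PySem.Dict String Int)).getD p.1 0)
      else b) ((none : Option String), (0 : Int))
      = pvOpt2Pair (((pvMoodMappings.map (fun p => (p.1, pvScore (t0 :: rest) p))).filter
          (fun q => 0 < q.2)).foldl pvMStep none) := by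
    have hcong := PySem.List.foldl_congr_mem pvMoodMappings
      (fun (b : Option String × Int) p =>
        if b.2 < ((t0 :: rest).foldl (fun d t =>
            match pvMoodIndex.get? t with
            | some mood => d.insert mood (d.getD mood 0 + 1)
            | none => d) (PySem.Dict.empty : PySem.Dict String Int)).getD p.1 0 then
          (some p.1, ((t0 :: rest).foldl (fun d t =>
            match pvMoodIndex.get? t with
            | some mood => d.insert mood (d.getD mood 0 + 1)
            | none => d) (PySem.Dict.empty : PySem.Dict String Int)).getD p.1 0)
        else b)
      (fun b p => pvBStep b (p.1, pvScore (t0 :: rest) p))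
      ((none : Option String), (0 : Int))
      (by intro acc p hp
          simp only [pvCounts_eq_score (t0 :: rest) p hp, pvBStep])
    rw [hcong]
    rw [← List.foldl_map (f := fun p : String × List String => (p.1, pvScore (t0 :: rest) p))
      (g := pvBStep)]
    exact pvSel _
  show (match (pvMoodMappings.foldl (fun (b : Option String × Int) p =>
      if b.2 < ((t0 :: rest).foldl (fun d t =>
          match pvMoodIndex.get? t with
          | some mood => d.insert mood (d.getD mood 0 + 1)
          | none => d) (PySem.Dict.empty : PySem.Dict String Int)).getD p.1 0 then
        (some p.1, ((t0 :: rest).foldl (fun d t =>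
          match pvMoodIndex.get? t with
          | some mood => d.insert mood (d.getD mood 0 + 1)
          | none => d) (PySem.Dict.empty : PySem.Dict String Int)).getD p.1 0)
      else b) ((none : Option String), (0 : Int))).1 with
    | some m => _
    | none => _) = _
  rw [hb]
  cases hF : ((pvMoodMappings.map (fun p => (p.1, pvScore (t0 :: rest) p))).filter
      (fun q => 0 < q.2)).foldl pvMStep none with
  | none => simp [pvResult, hF, pvOpt2Pair]
  | some b => simp [pvResult, hF, pvOpt2Pair]

-- ===== VERDICT (by name: the statement is the Claim_ definition above) =====
theorem determine_overall_mood_py_spec : Claim_equal_determine_overall_mood_py := by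
  intro themes cultural_context _
  unfold Spec_determine_overall_mood_py
  cases themes with
  | nil => rfl
  | cons t0 rest => rw [pvA_eval t0 rest cultural_context, pvB_eval t0 rest cultural_context]
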